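-- pv_equiv track=rewrite | github.com/calistamayer11/hw_11 | Graph.py | _sort_priority
-- ===== SOURCE A (Python) =====
-- def _sort_priority(entry, L):
--     if len(L) == 0:
--         return [entry]
--     index = len(L)
--     for i in range(len(L)):
--         if entry[2] > L[i][2]:
--             index = i
--             break
--     newList = L[:index]
--     newList.append(entry)
--     newList = newList + L[index:]
--     return newList
-- ===== SOURCE B (Python) =====
-- def _sort_priority(entry, L):
--     newList = []
--     inserted = False
--     for x in L:
--         if not inserted and entry[2] > x[2]:
--             newList.append(entry)
--             inserted = True
--         newList.append(x)
--     if not inserted: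
--         newList.append(entry)
--     return newList
-- ===== Notes on version B (the rewrite author's own statement) =====
-- stated objective: simpler
-- what changed: Replaced the index-search-then-slice-and-concatenate construction with a single accumulating pass using an 'inserted' flag, removing the index variable and all slicing.
import Mathlib
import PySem

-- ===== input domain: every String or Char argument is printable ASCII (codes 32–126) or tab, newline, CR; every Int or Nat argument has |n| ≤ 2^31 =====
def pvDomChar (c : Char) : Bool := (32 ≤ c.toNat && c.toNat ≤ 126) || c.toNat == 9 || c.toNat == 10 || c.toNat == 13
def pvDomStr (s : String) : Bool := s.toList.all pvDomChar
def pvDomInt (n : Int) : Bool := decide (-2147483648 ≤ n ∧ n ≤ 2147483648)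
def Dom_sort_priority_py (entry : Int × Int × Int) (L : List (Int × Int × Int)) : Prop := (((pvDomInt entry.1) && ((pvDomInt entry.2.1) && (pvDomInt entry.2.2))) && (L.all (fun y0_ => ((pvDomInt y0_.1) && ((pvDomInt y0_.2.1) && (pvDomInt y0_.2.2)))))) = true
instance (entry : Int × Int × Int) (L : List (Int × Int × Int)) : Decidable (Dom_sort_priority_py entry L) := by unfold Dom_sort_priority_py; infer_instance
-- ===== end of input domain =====

-- B replaces A's find-index-then-slice-and-concatenate with a single accumulating pass using an 'inserted' flag (objective: simpler; same O(n) cost).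


-- ===== PORT A =====
-- A: find the first index whose priority is strictly smaller (the for-loop with break), then slice and concatenate.
def pvFindIndex (p : Int) : List (Int × Int × Int) → Nat
  | [] => 0
  | x :: xs => if p > x.2.2 then 0 else 1 + pvFindIndex p xs

def sort_priority_py (entry : Int × Int × Int) (L : List (Int × Int × Int)) : List (Int × Int × Int) :=
  if L.length = 0 then [entry]
  else
    let index := pvFindIndex entry.2.2 L
    let newList := L.take index
    let newList := newList ++ [entry]
    newList ++ L.drop index

-- ===== PORT B =====
-- B: one accumulating pass with an 'inserted' flag; append the entry at the end if never inserted.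
def pvStep (entry : Int × Int × Int) (st : List (Int × Int × Int) × Bool) (x : Int × Int × Int) : List (Int × Int × Int) × Bool :=
  let st := if !st.2 && decide (entry.2.2 > x.2.2) then (st.1 ++ [entry], true) else st
  (st.1 ++ [x], st.2)

def sort_priority_py_alt (entry : Int × Int × Int) (L : List (Int × Int × Int)) : List (Int × Int × Int) :=
  let st := L.foldl (pvStep entry) ([], false)
  if st.2 then st.1 else st.1 ++ [entry]

-- ===== PRECONDITION & SPEC =====
def Spec_sort_priority_py (entry : Int × Int × Int) (L : List (Int × Int × Int)) (out : List (Int × Int × Int)) : Prop := out = sort_priority_py_alt entry L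
instance (entry : Int × Int × Int) (L : List (Int × Int × Int)) (out : List (Int × Int × Int)) : Decidable (Spec_sort_priority_py entry L out) := by unfold Spec_sort_priority_py; infer_instance

-- ===== CLAIM (what is proved, stated in full; the proofs are below) =====
def Claim_equal_sort_priority_py : Prop := ∀ (entry : Int × Int × Int) (L : List (Int × Int × Int)), Dom_sort_priority_py entry L → Spec_sort_priority_py entry L (sort_priority_py entry L)

-- ===== LEMMAS AND PROOFS =====

-- ===== VERDICT (by name: the statement is the Claim_ definition above) =====
lemma pvStep_inserted (entry : Int × Int × Int) (acc : List (Int × Int × Int))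
    (L : List (Int × Int × Int)) :
    L.foldl (pvStep entry) (acc, true) = (acc ++ L, true) := by
  induction L generalizing acc with
  | nil => simp
  | cons x xs ih => simp [pvStep, ih]

lemma pvLoop_eq (entry : Int × Int × Int) (L : List (Int × Int × Int))
    (acc : List (Int × Int × Int)) :
    (let st := L.foldl (pvStep entry) (acc, false)
     if st.2 then st.1 else st.1 ++ [entry]) =
      acc ++ (L.take (pvFindIndex entry.2.2 L) ++ [entry] ++ L.drop (pvFindIndex entry.2.2 L)) := by
  induction L generalizing acc with
  | nil => simp
  | cons x xs ih =>
    by_cases h : entry.2.2 > x.2.2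
    · simp [pvStep, h, pvFindIndex, pvStep_inserted]
    · have hd : decide (entry.2.2 > x.2.2) = false := by simp [h]
      simp only [List.foldl_cons, pvStep, hd, Bool.and_false, Bool.false_eq_true, if_false]
      rw [ih (acc ++ [x])]
      simp [pvFindIndex, h, Nat.add_comm]

theorem sort_priority_py_spec : Claim_equal_sort_priority_py := by
  intro entry L _
  unfold Spec_sort_priority_py sort_priority_py sort_priority_py_alt
  cases L with
  | nil => simp
  | cons x xs =>
    rw [pvLoop_eq entry (x :: xs) []]
    simp
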